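-- pv_equiv track=rewrite | github.com/LordLumineer/UserManagementAPI | app/core/utils.py | extract_initials_from_text
-- ===== SOURCE A (Python) =====
-- def extract_initials_from_text(text: str) -> str:
--     """
--     Extracts the initials from a given string.
--
--     :param str text: The string from which to extract the initials.
--     :return str: The extracted initials.
--     """
--     result = []
--     capitalize_next = True
--     for char in text:
--         if char.isalpha():
--             if capitalize_next:
--                 result.append(char.upper())
--                 capitalize_next = False
--             else:
--                 capitalize_next = False
--         elif char.isdigit() or char == '_' or char == ' ':
--             capitalize_next = True
--     return ''.join(result)
-- ===== SOURCE B (Python) =====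
-- def extract_initials_from_text(text: str) -> str:
--     # Tokenize: cut the text at digits/underscores/spaces; punctuation stays inside segments.
--     segments = [[]]
--     for ch in text:
--         if ch.isdigit() or ch == '_' or ch == ' ':
--             segments.append([])
--         else:
--             segments[-1].append(ch)
--     # Each segment contributes its first letter, uppercased.
--     out = []
--     for seg in segments:
--         for c in seg:
--             if c.isalpha():
--                 out.append(c.upper())
--                 break
--     return ''.join(out)
-- ===== Notes on version B (the rewrite author's own statement) =====
-- stated objective: alternative
-- what changed: Replaced A's single-pass capitalize_next state machine with a two-phase tokenize-then-scan: split the text into segments at digits/underscores/spaces, then each segment contributes its first letter uppercased.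
import Mathlib
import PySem

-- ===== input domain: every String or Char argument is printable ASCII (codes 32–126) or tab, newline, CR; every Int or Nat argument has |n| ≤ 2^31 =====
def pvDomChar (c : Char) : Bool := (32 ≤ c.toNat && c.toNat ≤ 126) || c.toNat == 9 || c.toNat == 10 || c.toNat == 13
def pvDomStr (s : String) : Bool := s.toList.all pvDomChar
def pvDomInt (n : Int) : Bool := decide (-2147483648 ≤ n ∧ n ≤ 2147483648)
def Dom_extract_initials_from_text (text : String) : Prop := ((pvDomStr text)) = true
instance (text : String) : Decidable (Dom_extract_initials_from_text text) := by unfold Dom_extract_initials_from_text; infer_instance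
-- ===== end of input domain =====

-- B replaces A's capitalize_next state machine by a tokenize-then-scan decomposition
-- (split at digits/underscores/spaces, then take the first letter of each segment, uppercased); objective: alternative.

-- ===== PORT A =====
-- A's loop: state (result, capitalize_next), one step per character, branches in A's order.
def pvStepA (st : List Char × Bool) (ch : Char) : List Char × Bool :=
  if PySem.Chars.isalpha ch then
    if st.2 then (st.1 ++ [PySem.Chars.upperChar ch], false) else (st.1, false)
  else if PySem.Chars.isdigit ch || ch == '_' || ch == ' ' then (st.1, true)
  else st

def extract_initials_from_text (text : String) : String :=
  String.ofList (text.toList.foldl pvStepA ([], true)).1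

-- ===== PORT B =====
-- B phase 1: cut the text into segments at digits/underscores/spaces (state: finished segments, current segment).
def pvStepB (st : List (List Char) × List Char) (ch : Char) : List (List Char) × List Char :=
  if PySem.Chars.isdigit ch || ch == '_' || ch == ' ' then (st.1 ++ [st.2], [])
  else (st.1, st.2 ++ [ch])

-- B phase 2: a segment contributes its first letter, uppercased (nothing if it has no letter).
def pvFirstAlpha : List Char → List Char
  | [] => []
  | c :: cs => if PySem.Chars.isalpha c then [PySem.Chars.upperChar c] else pvFirstAlpha cs

def extract_initials_from_text_alt (text : String) : String :=
  let st := text.toList.foldl pvStepB ([], [])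
  String.ofList ((st.1 ++ [st.2]).flatMap pvFirstAlpha)

-- ===== PRECONDITION & SPEC =====
def Spec_extract_initials_from_text (text : String) (out : String) : Prop := out = extract_initials_from_text_alt text
instance (text : String) (out : String) : Decidable (Spec_extract_initials_from_text text out) := by unfold Spec_extract_initials_from_text; infer_instance

-- ===== CLAIM (what is proved, stated in full; the proofs are below) =====
def Claim_equal_extract_initials_from_text : Prop := ∀ (text : String), Dom_extract_initials_from_text text → Spec_extract_initials_from_text text (extract_initials_from_text text)

-- ===== LEMMAS AND PROOFS =====

-- A letter is never one of B's separators (true for every Char under PySem's ASCII-exact predicates).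
theorem pv_alpha_not_sep (c : Char) (h : PySem.Chars.isalpha c = true) :
    (PySem.Chars.isdigit c || c == '_' || c == ' ') = false := by
  simp only [PySem.Chars.isalpha, PySem.Chars.isupper, PySem.Chars.islower,
    PySem.Chars.isdigit, Bool.or_eq_true, Bool.and_eq_true, decide_eq_true_eq,
    Char.le_def, Bool.or_eq_false_iff, Bool.and_eq_false_iff, decide_eq_false_iff_not,
    beq_eq_false_iff_ne, ne_eq, Char.ext_iff, UInt32.le_iff_toNat_le, ← UInt32.toNat_inj,
    show ('A'.val).toNat = 65 from rfl, show ('Z'.val).toNat = 90 from rfl,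
    show ('a'.val).toNat = 97 from rfl, show ('z'.val).toNat = 122 from rfl,
    show ('0'.val).toNat = 48 from rfl, show ('9'.val).toNat = 57 from rfl,
    show ('_'.val).toNat = 95 from rfl, show (' '.val).toNat = 32 from rfl] at h ⊢
  omega

-- Reference function: A's remaining contribution from the rest of the text, given capitalize_next.
def pvRef : List Char → Bool → List Char
  | [], _ => []
  | c :: cs, cap =>
    if PySem.Chars.isalpha c then (if cap then PySem.Chars.upperChar c :: pvRef cs false else pvRef cs false)
    else if PySem.Chars.isdigit c || c == '_' || c == ' ' then pvRef cs true
    else pvRef cs cap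

theorem pvFoldA_eq (cs : List Char) : ∀ (r : List Char) (cap : Bool),
    (cs.foldl pvStepA (r, cap)).1 = r ++ pvRef cs cap := by
  induction cs with
  | nil => intro r cap; simp [pvRef]
  | cons c cs ih =>
    intro r cap
    simp only [List.foldl, pvStepA, pvRef]
    split_ifs with h1 h2 h3 <;> rw [ih] <;> simp

theorem pvFirstAlpha_none (cur : List Char) (h : cur.any PySem.Chars.isalpha = false) :
    pvFirstAlpha cur = [] := by
  induction cur with
  | nil => rfl
  | cons c cs ih =>
    simp only [List.any_cons, Bool.or_eq_false_iff] at h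
    simp [pvFirstAlpha, h.1, ih h.2]

theorem pvFirstAlpha_append (cur : List Char) (c : Char) :
    pvFirstAlpha (cur ++ [c]) =
      if cur.any PySem.Chars.isalpha then pvFirstAlpha cur
      else if PySem.Chars.isalpha c then [PySem.Chars.upperChar c] else [] := by
  induction cur with
  | nil => simp [pvFirstAlpha]
  | cons x xs ih =>
    by_cases hx : PySem.Chars.isalpha x = true <;>
      simp [pvFirstAlpha, hx, ih, List.any_cons]

theorem pvFoldB_eq (cs : List Char) : ∀ (done : List (List Char)) (cur : List Char),
    (let st := cs.foldl pvStepB (done, cur)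
     (st.1 ++ [st.2]).flatMap pvFirstAlpha) =
      done.flatMap pvFirstAlpha ++ pvFirstAlpha cur ++ pvRef cs (!cur.any PySem.Chars.isalpha) := by
  induction cs with
  | nil => intro done cur; simp [pvRef]
  | cons c cs ih =>
    intro done cur
    simp only [List.foldl, pvStepB, pvRef]
    by_cases ha : PySem.Chars.isalpha c = true
    · rw [if_neg (by simp [pv_alpha_not_sep c ha]), ih, if_pos ha]
      by_cases hc : cur.any PySem.Chars.isalpha = true
      · simp [hc, pvFirstAlpha_append, List.any_append, List.append_assoc]
      · simp [hc, pvFirstAlpha_append, pvFirstAlpha_none _ (by simpa using hc), ha,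
          List.any_append, List.any_cons, List.append_assoc]
    · by_cases hsep : (PySem.Chars.isdigit c || c == '_' || c == ' ') = true
      · rw [if_pos hsep, ih, if_neg ha, if_pos hsep]
        simp [List.flatMap_append, pvFirstAlpha, List.append_assoc]
      · rw [if_neg hsep, ih, if_neg ha, if_neg hsep]
        by_cases hc : cur.any PySem.Chars.isalpha = true <;>
          simp [hc, pvFirstAlpha_append, ha, pvFirstAlpha_none, List.any_append,
            List.any_cons, List.append_assoc]

-- ===== VERDICT (by name: the statement is the Claim_ definition above) =====
theorem extract_initials_from_text_spec : Claim_equal_extract_initials_from_text := by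
  intro text _
  unfold Spec_extract_initials_from_text extract_initials_from_text extract_initials_from_text_alt
  rw [pvFoldA_eq]
  simp only []
  rw [pvFoldB_eq]
  simp [pvFirstAlpha]
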